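-- pv_equiv track=rewrite | github.com/DoutorRaposo/Poster-Scraper | helpers.py | get_filmography
-- ===== SOURCE A (Python) =====
-- def get_filmography(filmography_json):
--     filmography = {}
--     for key in filmography_json:
--         for movies in filmography_json[key]:
--             try:
--                 if movies["job"] not in filmography:
--                     filmography[movies["job"]] = []
--                 filmography[movies["job"]].append(movies)
--             except KeyError:
--                 continue
--     filmography["cast"] = filmography_json["cast"]
--     list_roles = list(filmography.keys())
--     ordered_list = sorted(list_roles, key=str.casefold)
--     ordered_filmography = {k : filmography[k] for k in ordered_list}
--     return ordered_filmography
-- ===== SOURCE B (Python) =====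
-- def get_filmography(filmography_json):
--     items = [m for movies in filmography_json.values() for m in movies]
--     order = list(dict.fromkeys(m["job"] for m in items if "job" in m))
--     if "cast" not in order:
--         order.append("cast")
--     order.sort(key=str.casefold)
--     return {k: filmography_json["cast"] if k == "cast"
--                else [m for m in items if m.get("job") == k]
--             for k in order}
-- ===== Notes on version B (the rewrite author's own statement) =====
-- stated objective: idiomatic
-- what changed: Replaces A's incremental dict-of-lists mutation with a flatten of all items, dict.fromkeys dedup of the job keys plus the 'cast' key, one casefold sort, and a per-key filter comprehension that builds each bucket directly.
import Mathlib
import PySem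

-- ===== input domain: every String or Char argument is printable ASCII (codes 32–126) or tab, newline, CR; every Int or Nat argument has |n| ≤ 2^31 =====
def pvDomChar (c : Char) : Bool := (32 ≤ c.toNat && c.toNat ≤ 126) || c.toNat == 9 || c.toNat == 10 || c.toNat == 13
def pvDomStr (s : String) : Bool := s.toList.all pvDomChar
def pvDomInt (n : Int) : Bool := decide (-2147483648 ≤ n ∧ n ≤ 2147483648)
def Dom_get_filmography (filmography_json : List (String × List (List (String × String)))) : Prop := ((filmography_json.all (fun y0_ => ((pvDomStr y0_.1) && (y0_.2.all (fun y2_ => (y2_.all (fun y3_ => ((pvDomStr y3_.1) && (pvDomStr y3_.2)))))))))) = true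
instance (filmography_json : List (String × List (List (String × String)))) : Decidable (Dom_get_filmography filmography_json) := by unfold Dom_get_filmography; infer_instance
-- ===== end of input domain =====

-- B replaces A's incremental dict-of-lists mutation by dedup of the job keys plus a per-key
-- filter over a flattened item list (idiomatic; return value only, no mutation involved).

-- ===== PORT A =====
-- Python dicts arrive as assoc lists; dict(...) conversion at the boundary is PySem.Dict.ofList
-- (duplicate keys collapse, last value wins, first position kept) — exact for CPython dicts.
def get_filmography (filmography_json : List (String × List (List (String × String)))) : List (String × List (List (String × String))) :=
  let fd : PySem.Dict String (List (List (String × String))) := PySem.Dict.ofList filmography_json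
  -- filmography = {}; for key in filmography_json: for movies in filmography_json[key]: …
  let filmography : PySem.Dict String (List (List (String × String))) :=
    fd.items.foldl (fun d kv =>
      kv.2.foldl (fun d movies =>
        let md : PySem.Dict String String := PySem.Dict.ofList movies
        match md.get? "job" with          -- KeyError → continue
        | none => d
        | some j =>
          let d1 := if d.contains j then d else d.insert j []   -- if job not in filmography: … = []
          d1.insert j (d1.getD j [] ++ [md.items])              -- filmography[job].append(movies)
        ) d) PySem.Dict.empty
  -- filmography["cast"] = filmography_json["cast"]   (KeyError when "cast" absent: excluded by Pre_)
  let filmography := filmography.insert "cast" ((fd.getD "cast" []).map (fun m => (PySem.Dict.ofList m).items))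
  let list_roles := filmography.keys
  let ordered_list := PySem.List.sorted list_roles (fun s => PySem.Str.lower s) false  -- casefold = lower on the ASCII domain
  ordered_list.map (fun k => (k, filmography.getD k []))   -- {k : filmography[k] for k in ordered_list}, keys distinct

-- ===== PORT B =====
def get_filmography_alt (filmography_json : List (String × List (List (String × String)))) : List (String × List (List (String × String))) :=
  let fd : PySem.Dict String (List (List (String × String))) := PySem.Dict.ofList filmography_json
  -- items = [m for movies in filmography_json.values() for m in movies]
  let items : List (PySem.Dict String String) := fd.values.flatMap (fun movies => movies.map PySem.Dict.ofList)
  -- order = list(dict.fromkeys(m["job"] for m in items if "job" in m))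
  let order := PySem.List.dedup (items.filterMap (fun m => m.get? "job"))
  -- if "cast" not in order: order.append("cast")
  let order := if order.contains "cast" then order else order ++ ["cast"]
  -- order.sort(key=str.casefold)  (casefold = lower on the ASCII domain)
  let ordered := PySem.List.sorted order (fun s => PySem.Str.lower s) false
  ordered.map (fun k => (k,
    if k == "cast" then (fd.getD "cast" []).map (fun m => (PySem.Dict.ofList m).items)  -- filmography_json["cast"]
    else (items.filter (fun m => m.get? "job" == some k)).map (fun m => m.items)))

-- ===== PRECONDITION & SPEC =====
-- Pre_ excludes exactly the inputs on which A raises KeyError: no "cast" key in filmography_json.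
def Pre_get_filmography (filmography_json : List (String × List (List (String × String)))) : Prop :=
  "cast" ∈ filmography_json.map (fun p => p.1)
instance (filmography_json : List (String × List (List (String × String)))) : Decidable (Pre_get_filmography filmography_json) := by unfold Pre_get_filmography; infer_instance
def pvWitness_get_filmography : (List (String × List (List (String × String)))) :=
  [("cast", [[("title", "X")]]), ("crew", [[("job", "Director"), ("title", "X")]])]

def Spec_get_filmography (filmography_json : List (String × List (List (String × String)))) (out : List (String × List (List (String × String)))) : Prop := out = get_filmography_alt filmography_json
instance (filmography_json : List (String × List (List (String × String)))) (out : List (String × List (List (String × String)))) : Decidable (Spec_get_filmography filmography_json out) := by unfold Spec_get_filmography; infer_instance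

-- ===== CLAIM (what is proved, stated in full; the proofs are below) =====
def Claim_equal_get_filmography : Prop := ∀ (filmography_json : List (String × List (List (String × String)))), Dom_get_filmography filmography_json → Pre_get_filmography filmography_json → Spec_get_filmography filmography_json (get_filmography filmography_json)

-- ===== LEMMAS AND PROOFS =====

-- the (job, normalized item) pairs A's grouping loop processes, in order
def pvPairs (l : List (List (String × String))) : List (String × List (String × String)) :=
  l.filterMap (fun m => ((PySem.Dict.ofList m).get? "job").map (fun j => (j, (PySem.Dict.ofList m).items)))

-- A's per-item step is the grouping step d.modify job [] (· ++ [item])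
theorem pvFold_eq_modify (l : List (List (String × String)))
    (d : PySem.Dict String (List (List (String × String)))) :
    l.foldl (fun d movies =>
        let md : PySem.Dict String String := PySem.Dict.ofList movies
        match md.get? "job" with
        | none => d
        | some j =>
          let d1 := if d.contains j then d else d.insert j []
          d1.insert j (d1.getD j [] ++ [md.items])) d
      = (pvPairs l).foldl (fun d p => d.modify p.1 [] (fun v => v ++ [p.2])) d := by
  induction l generalizing d with
  | nil => rfl
  | cons m t ih =>
    simp only [List.foldl_cons, pvPairs, List.filterMap_cons]
    cases h : (PySem.Dict.ofList m).get? "job" with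
    | none => simpa [pvPairs, h] using ih _
    | some j =>
      simp only [Option.map_some, List.foldl_cons]
      have hstep : (if d.contains j then d else d.insert j []).insert j
            ((if d.contains j then d else d.insert j []).getD j [] ++ [(PySem.Dict.ofList m).items])
          = d.modify j [] (fun v => v ++ [(PySem.Dict.ofList m).items]) := by
        by_cases hc : d.contains j
        · simp [hc, PySem.Dict.modify]
        · simp only [hc, Bool.false_eq_true, if_false, PySem.Dict.modify]
          rw [PySem.Dict.getD_insert_self, PySem.Dict.insert_insert_self,
              PySem.Dict.getD_of_not_contains (h := by simpa using hc)]
      rw [hstep]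
      simpa [pvPairs] using ih _

-- bucket contents: the grouped pairs filtered at k are B's per-key filter of the items
theorem pvBucket (l : List (List (String × String))) (k : String) :
    (((pvPairs l).filter (fun p => p.1 == k)).map (fun p => p.2))
      = ((l.map PySem.Dict.ofList).filter (fun m => m.get? "job" == some k)).map
          (fun m => m.items) := by
  induction l with
  | nil => rfl
  | cons m t ih =>
    simp only [pvPairs, List.filterMap_cons, List.map_cons, List.filter_cons]
    cases h : (PySem.Dict.ofList m).get? "job" with
    | none => simpa [pvPairs, h] using ih
    | some j =>
      by_cases hk : j = k
      · simpa [pvPairs, h, hk] using ih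
      · simpa [pvPairs, h, hk] using ih

-- key order: first occurrences of the jobs, = B's dedup of the job list
theorem pvJobs (l : List (List (String × String))) :
    (pvPairs l).map (fun p => p.1)
      = (l.map PySem.Dict.ofList).filterMap (fun m => m.get? "job") := by
  simp [pvPairs, List.map_filterMap, List.filterMap_map, Option.map_map, Function.comp_def]

theorem get_filmography_eq_alt (filmography_json : List (String × List (List (String × String)))) :
    get_filmography filmography_json = get_filmography_alt filmography_json := by
  unfold get_filmography get_filmography_alt
  simp only [pvFold_eq_modify, ← List.foldl_flatMap]
  have hfd : ∀ x : PySem.Dict String (List (List (String × String))), x.values = x.items.map (fun kv => kv.2) := fun x => rfl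
  set fd := PySem.Dict.ofList filmography_json with hfddef
  set allItems := fd.items.flatMap (fun kv => kv.2) with hall
  have h1 : fd.items.flatMap (fun x => pvPairs x.2) = pvPairs allItems := by
    simp [pvPairs, hall, List.filterMap_flatMap]
  have h2 : fd.values.flatMap (fun movies => movies.map PySem.Dict.ofList)
      = allItems.map PySem.Dict.ofList := by
    simp [hfd fd, hall, List.flatMap_map, List.map_flatMap]
  set dA := List.foldl (fun d p => d.modify p.1 [] fun v => v ++ [p.2]) PySem.Dict.empty
      (fd.items.flatMap (fun x => pvPairs x.2)) with hdA
  set c := List.map (fun m => (PySem.Dict.ofList m).items) (fd.getD "cast" []) with hc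
  set order := PySem.List.dedup (List.filterMap (fun m => m.get? "job")
      (fd.values.flatMap (fun movies => movies.map PySem.Dict.ofList))) with horder
  have hkeys : dA.keys = order := by
    rw [hdA, h1, horder, h2]
    rw [PySem.Dict.keys_foldl_modify_key (pvPairs allItems) (fun p => p.1) []
        (fun _ p => fun v => v ++ [p.2]) PySem.Dict.empty]
    rw [PySem.Dict.keys_empty, PySem.Set.update_nil_left, PySem.List.dedup_eq_ofList, pvJobs]
  have hcont : (dA.insert "cast" c).keys = if order.contains "cast" then order else order ++ ["cast"] := by
    by_cases hm : ("cast" : String) ∈ order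
    · rw [PySem.Dict.keys_insert_of_contains _ _ (by rw [PySem.Dict.contains_iff_mem_keys, hkeys]; exact hm),
          hkeys, if_pos (by simpa using hm)]
    · rw [PySem.Dict.keys_insert_of_not_contains _ _
            (by rw [← Bool.not_eq_true, PySem.Dict.contains_iff_mem_keys, hkeys]; exact hm),
          hkeys, if_neg (by simpa using hm)]
  have hval : ∀ k : String, (dA.insert "cast" c).getD k []
      = if (k == "cast") = true then c
        else ((fd.values.flatMap (fun movies => movies.map PySem.Dict.ofList)).filter
                (fun m => m.get? "job" == some k)).map (fun m => m.items) := by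
    intro k
    rw [PySem.Dict.getD_insert]
    by_cases hk : k = "cast"
    · simp [hk]
    · rw [if_neg hk, if_neg (by simpa using hk), hdA, h1, h2,
          PySem.Dict.getD_foldl_modify_append, PySem.Dict.getD_empty, pvBucket]
      simp
  rw [hcont]
  exact List.map_congr_left (fun k _ => by rw [hval k])

-- ===== VERDICT (by name: the statement is the Claim_ definition above) =====
theorem get_filmography_spec : Claim_equal_get_filmography := by
  intro fj _ _
  unfold Spec_get_filmography
  exact get_filmography_eq_alt fj
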